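-- pv_equiv track=rewrite | github.com/Takeda-Takumi/Programming | paiza/S/S007/S007.py | search
-- ===== SOURCE A (Python) =====
-- alphabet = 'abcdefghijklmnopqrstuvwxyz'
--
-- def search(strings):
--     changes = {i: 0 for i in alphabet}
--     strings_n = len(strings)
--     strings = strings + '#'
--     i = 0
--     while i < strings_n:
--         while True:
--             if(strings[i] == '#'):
--                 return changes
--             elif(strings[i] != '(' and (not strings[i].isdecimal()) and strings[i] != ')'):
--                 changes[strings[i]] = changes[strings[i]] + 1
--             else:
--                 break
--             i += 1
--
--         number = ''
--         number_start = i
--         while strings[i].isdecimal():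
--             number += strings[i]
--             i += 1
--         if(len(number) != 0):
--             number_int = int(strings[number_start:i])
--         else:
--             number_int = 1
--
--         if(strings[i] != '('):
--             changes[strings[i]] = changes[strings[i]] + number_int
--         else:
--             quote_count = 0
--             stringpart_start = i+1
--
--             while True:
--                 if(strings[i] == '('):
--                     quote_count += 1
--                 if(strings[i] == ')'):
--                     quote_count -= 1
--                 if(quote_count == 0):
--                     break
--                 i += 1
--             stringpart = strings[stringpart_start:i]
--             tmp = search(stringpart)
--             for k in alphabet:
--                 changes[k] = changes[k] + tmp[k]*number_int
--         i += 1
--     return changes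
-- ===== SOURCE B (Python) =====
-- # B: one-pass recursive-descent parser; no rescanning for matching parentheses,
-- # no substring copies for nested groups.
-- alphabet = 'abcdefghijklmnopqrstuvwxyz'
--
-- def search(strings):
--     n = len(strings)
--
--     def parse(i):
--         # parse items until an unmatched ')' or the end; return (counts, stop index)
--         counts = {c: 0 for c in alphabet}
--         while i < n and strings[i] != ')':
--             j = i
--             while i < n and strings[i].isdecimal():
--                 i += 1
--             mult = int(strings[j:i]) if i > j else 1
--             if i < n and strings[i] == '(':
--                 inner, i = parse(i + 1)
--                 i += 1  # step over the closing ')'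
--                 for c in alphabet:
--                     counts[c] += inner[c] * mult
--             elif i < n:
--                 counts[strings[i]] += mult
--                 i += 1
--             # else: trailing digits with nothing to apply them to; loop ends
--         return counts, i
--
--     return parse(0)[0]
-- ===== Notes on version B (the rewrite author's own statement) =====
-- stated objective: alternative
-- what changed: A finds each '(' group's matching ')' by a separate counting rescan, copies the group out with a slice and recurses on the copy, while B is a one-pass recursive-descent parser over the original string with no rescans or substring copies; Pre_ restricts inputs to the task's grammar (lowercase letters, digits as multipliers, balanced parentheses), excluding strings with '#' (A's internal sentinel), on which A's early return counts only the prefix before the '#'.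
import Mathlib
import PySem

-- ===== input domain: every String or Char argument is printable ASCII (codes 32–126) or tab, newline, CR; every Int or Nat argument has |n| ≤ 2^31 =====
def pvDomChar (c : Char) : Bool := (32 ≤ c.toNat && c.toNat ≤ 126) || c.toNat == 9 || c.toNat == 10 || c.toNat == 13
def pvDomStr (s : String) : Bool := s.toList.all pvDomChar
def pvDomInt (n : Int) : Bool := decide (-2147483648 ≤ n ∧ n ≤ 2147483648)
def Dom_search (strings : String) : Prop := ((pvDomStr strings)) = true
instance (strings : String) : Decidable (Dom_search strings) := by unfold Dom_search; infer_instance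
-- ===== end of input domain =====

-- B replaces A's rescan-and-slice recursion on '(' groups by a one-pass recursive-descent
-- parse of the original string (no matching-parenthesis rescans, no substring copies).

-- the module constant `alphabet` and the dict keys (1-character Python strings)
def pvAlphabet : List Char :=
  ['a','b','c','d','e','f','g','h','i','j','k','l','m','n','o','p','q','r','s','t','u','v','w','x','y','z']
def pvKey (c : Char) : String := String.ofList [c]

-- {i: 0 for i in alphabet} / {c: 0 for c in alphabet} — the zero dict both programs start from
def pvInitDict : PySem.Dict String Int :=
  pvAlphabet.foldl (fun d c => d.insert (pvKey c) 0) PySem.Dict.empty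

-- ===== PORT A =====

-- changes[c] = changes[c] + v  (the key is present on every admitted input; a missing
-- key is Python's KeyError, excluded by Pre_)
def pvBumpA (d : PySem.Dict String Int) (c : Char) (v : Int) : PySem.Dict String Int :=
  d.insert (pvKey c) (d.getD (pvKey c) 0 + v)

-- the inner `while True` letters loop; Sum.inl = the early `return changes`.
-- Indexing uses getD: the default is never read inside Pre_ (fuel n+1-i covers the scan).
def pvLettersA (s : List Char) (fuel i : Nat) (d : PySem.Dict String Int) :
    Sum (PySem.Dict String Int) (Nat × PySem.Dict String Int) :=
  match fuel with
  | 0 => .inr (i, d)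
  | fuel + 1 =>
    let c := s.getD i '#'
    if c = '#' then .inl d
    else if c ≠ '(' ∧ PySem.Chars.isdigit c = false ∧ c ≠ ')' then
      pvLettersA s fuel (i + 1) (pvBumpA d c 1)
    else .inr (i, d)

-- while strings[i].isdecimal(): number += strings[i]; i += 1
def pvNumA (s : List Char) (fuel i : Nat) (number : List Char) : Nat × List Char :=
  match fuel with
  | 0 => (i, number)
  | fuel + 1 =>
    if PySem.Chars.isdigit (s.getD i '#') then
      pvNumA s fuel (i + 1) (number ++ [s.getD i '#'])
    else (i, number)

-- the quote_count scan for the matching ')'; running past the end is Python's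
-- IndexError (outside Pre_), guarded here by the fuel
def pvParenA (s : List Char) (fuel i : Nat) (q : Int) : Nat :=
  match fuel with
  | 0 => i
  | fuel + 1 =>
    let c := s.getD i '#'
    let q := if c = '(' then q + 1 else q
    let q := if c = ')' then q - 1 else q
    if q = 0 then i else pvParenA s fuel (i + 1) q

-- the outer `while i < strings_n` loop
def pvOuterA (rec : List Char → PySem.Dict String Int) (s : List Char) (n : Nat) :
    Nat → Nat → PySem.Dict String Int → PySem.Dict String Int
  | 0, _, changes => changes
  | fuel + 1, i, changes =>
    if i < n then
      match pvLettersA s (n + 1 - i) i changes with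
      | .inl d => d
      | .inr (i, changes) =>
        let r := pvNumA s (n + 1 - i) i []
        let numberInt : Int :=
          if r.2 ≠ [] then
            (PySem.Int.ofChars? (PySem.List.slice s (some (i : Int)) (some (r.1 : Int)))).getD 0
          else 1
        if s.getD r.1 '#' ≠ '(' then
          pvOuterA rec s n fuel (r.1 + 1) (pvBumpA changes (s.getD r.1 '#') numberInt)
        else
          let m := pvParenA s (n + 2 - r.1) r.1 0
          let stringpart := PySem.List.slice s (some ((r.1 + 1 : Nat) : Int)) (some ((m : Nat) : Int))
          let tmp := rec stringpart
          let changes := pvAlphabet.foldl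
            (fun d k => pvBumpA d k (tmp.getD (pvKey k) 0 * numberInt)) changes
          pvOuterA rec s n fuel (m + 1) changes
    else changes

-- the recursive `search` itself; the fuel bounds only the recursion DEPTH
-- (nesting depth ≤ length, so length+1 is always enough)
def pvSearchA : Nat → List Char → PySem.Dict String Int
  | 0, _ => pvInitDict
  | depth + 1, l => pvOuterA (pvSearchA depth) (l ++ ['#']) l.length (l.length + 1) 0 pvInitDict

def search (strings : String) : List (String × Int) :=
  (pvSearchA (strings.toList.length + 1) strings.toList).items

-- ===== PORT B =====
-- while i < n and strings[i].isdecimal(): i += 1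
def pvSkipDigitsB (l : List Char) (n : Nat) : Nat → Nat → Nat
  | 0, i => i
  | fuel + 1, i =>
    if i < n ∧ PySem.Chars.isdigit (l.getD i ' ') then pvSkipDigitsB l n fuel (i + 1) else i

-- parse(i): items until an unmatched ')' or the end; one fuel unit per loop
-- iteration and per nested call (2n+2 always suffices)
def pvParseB (l : List Char) (n : Nat) :
    Nat → Nat → PySem.Dict String Int → PySem.Dict String Int × Nat
  | 0, i, counts => (counts, i)
  | fuel + 1, i, counts =>
    if i < n ∧ l.getD i ' ' ≠ ')' then
      let j := i
      let i := pvSkipDigitsB l n (n + 1 - i) i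
      let mult : Int :=
        if j < i then
          (PySem.Int.ofChars? (PySem.List.slice l (some (j : Int)) (some (i : Int)))).getD 0
        else 1
      if i < n ∧ l.getD i ' ' = '(' then
        let r := pvParseB l n fuel (i + 1) pvInitDict
        let counts := pvAlphabet.foldl
          (fun d c => d.modify (pvKey c) 0 (· + r.1.getD (pvKey c) 0 * mult)) counts
        pvParseB l n fuel (r.2 + 1) counts
      else if i < n then
        pvParseB l n fuel (i + 1) (counts.modify (pvKey (l.getD i ' ')) 0 (· + mult))
      else (counts, i)
    else (counts, i)

def search_alt (strings : String) : List (String × Int) :=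
  (pvParseB strings.toList strings.toList.length (2 * strings.toList.length + 2) 0 pvInitDict).1.items

-- ===== PRECONDITION & SPEC =====
-- balance checker: final counter if no prefix ever over-closes, else none
def pvParRun : List Char → Int → Option Int
  | [], k => some k
  | c :: u, k =>
    if c = '(' then pvParRun u (k + 1)
    else if c = ')' then (if 0 < k then pvParRun u (k - 1) else none)
    else pvParRun u k

-- every digit is followed by another character that is not ')'
def pvDigOk : List Char → Bool
  | [] => true
  | [c] => !(PySem.Chars.isdigit c)
  | c :: d :: u => (!(PySem.Chars.isdigit c) || (d != ')')) && pvDigOk (d :: u)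

-- Pre_: the task's grammar — lowercase letters, digits and balanced parentheses, every
-- digit run applying to a following letter or '('. Outside it A raises KeyError/IndexError,
-- except on strings containing '#' (A's internal sentinel), where A's early return counts
-- only the prefix before the '#': those accidental values stay excluded (B raises there).
def Pre_search (strings : String) : Prop :=
  strings.toList.all
    (fun c => pvAlphabet.contains c || PySem.Chars.isdigit c || c == '(' || c == ')') = true ∧
  pvDigOk strings.toList = true ∧ pvParRun strings.toList 0 = some 0

instance (strings : String) : Decidable (Pre_search strings) := by
  unfold Pre_search; infer_instance

def pvWitness_search : String := "2(ab)c"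

def Spec_search (strings : String) (out : List (String × Int)) : Prop := out = search_alt strings
instance (strings : String) (out : List (String × Int)) : Decidable (Spec_search strings out) := by
  unfold Spec_search; infer_instance

-- ===== CLAIM (what is proved, stated in full; the proofs are below) =====
def Claim_equal_search : Prop :=
  ∀ (strings : String), Dom_search strings → Pre_search strings → Spec_search strings (search strings)

-- ===== LEMMAS AND PROOFS =====

-- the common reference semantics: count of one "item sequence", together with the
-- unconsumed rest (which starts at the first unmatched ')' if any)
def pvCntF : Nat → List Char → (Char → Int) × List Char
  | 0, t => (fun _ => 0, t)
  | f + 1, t =>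
    let ds := t.takeWhile PySem.Chars.isdigit
    let m : Int := if ds = [] then 1 else (PySem.Int.ofChars? ds).getD 0
    match t.dropWhile PySem.Chars.isdigit with
    | [] => (fun _ => 0, [])
    | c :: u =>
      if c = ')' then (fun _ => 0, c :: u)
      else if c = '(' then
        let p := pvCntF f u
        let q := pvCntF f p.2.tail
        (fun x => m * p.1 x + q.1 x, q.2)
      else
        let q := pvCntF f u
        (fun x => if x = c then q.1 x + m else q.1 x, q.2)

def pvCnt (t : List Char) : Char → Int := (pvCntF (t.length + 1) t).1

-- the grammar, as an inductive derivation
inductive pvValid : List Char → Prop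
  | nil : pvValid []
  | letter (ds : List Char) (c : Char) (t : List Char) :
      (∀ d ∈ ds, PySem.Chars.isdigit d = true) → c ∈ pvAlphabet → pvValid t →
      pvValid (ds ++ c :: t)
  | group (ds inner t : List Char) :
      (∀ d ∈ ds, PySem.Chars.isdigit d = true) → pvValid inner → pvValid t →
      pvValid (ds ++ '(' :: inner ++ ')' :: t)

-- abstraction of both programs' dicts: the 26 letter keys in order, values f
def pvMkD (f : Char → Int) : PySem.Dict String Int :=
  PySem.Dict.mk (pvAlphabet.map (fun c => (pvKey c, f c)))

-- ---- character facts ----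
theorem pv_alpha_facts : ∀ c ∈ pvAlphabet,
    c ≠ '(' ∧ c ≠ ')' ∧ c ≠ '#' ∧ PySem.Chars.isdigit c = false := by
  have h : pvAlphabet.all
      (fun c => !(c == '(') && !(c == ')') && !(c == '#') && !(PySem.Chars.isdigit c)) = true := by
    rfl
  intro c hc
  have := List.all_eq_true.mp h c hc
  simp only [Bool.and_eq_true, Bool.not_eq_true', beq_eq_false_iff_ne] at this
  exact ⟨this.1.1.1, this.1.1.2, this.1.2, this.2⟩

theorem pv_digit_facts {c : Char} (h : PySem.Chars.isdigit c = true) :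
    c ≠ '(' ∧ c ≠ ')' ∧ c ≠ '#' ∧ c ∉ pvAlphabet := by
  refine ⟨?_, ?_, ?_, ?_⟩
  · rintro rfl; simp [PySem.Chars.isdigit] at h
  · rintro rfl; simp [PySem.Chars.isdigit] at h
  · rintro rfl; simp [PySem.Chars.isdigit] at h
  · intro hm; have := (pv_alpha_facts c hm).2.2.2; rw [this] at h; cases h

theorem pvKey_inj {a b : Char} : pvKey a = pvKey b ↔ a = b := by
  constructor
  · intro h
    have := congrArg String.toList h
    simpa [pvKey] using this
  · rintro rfl; rfl

theorem pvKey_beq {a b : Char} : (pvKey a == pvKey b) = true ↔ a = b := by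
  rw [beq_iff_eq]; exact pvKey_inj

-- ---- dict lemmas ----
theorem pv_get?_mkDL (as : List Char) (f : Char → Int) (c : Char) (hc : c ∈ as) :
    (PySem.Dict.mk (as.map (fun x => (pvKey x, f x))) : PySem.Dict String Int).get? (pvKey c)
      = some (f c) := by
  induction as with
  | nil => cases hc
  | cons a as ih =>
    simp only [List.map_cons, PySem.Dict.get?_mk_cons]
    by_cases hac : a = c
    · subst hac; simp
    · have : (pvKey a == pvKey c) = false := by
        rw [Bool.eq_false_iff]; intro h; exact hac (pvKey_beq.mp h)
      rw [this]
      simp only [Bool.false_eq_true, if_false]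
      exact ih ((List.mem_cons.mp hc).resolve_left (fun h => hac h.symm))

theorem pv_get?_mkD (f : Char → Int) (c : Char) (hc : c ∈ pvAlphabet) :
    (pvMkD f).get? (pvKey c) = some (f c) := pv_get?_mkDL pvAlphabet f c hc

theorem pv_getD_mkD (f : Char → Int) (c : Char) (hc : c ∈ pvAlphabet) :
    (pvMkD f).getD (pvKey c) 0 = f c := by
  rw [PySem.Dict.getD_eq_get?_getD, pv_get?_mkD f c hc]; rfl

theorem pv_contains_mkD (f : Char → Int) (c : Char) (hc : c ∈ pvAlphabet) :
    (pvMkD f).contains (pvKey c) = true := by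
  rw [PySem.Dict.contains_eq_isSome_get?, pv_get?_mkD f c hc]; rfl

theorem pv_mkD_congr {f g : Char → Int} (h : ∀ c ∈ pvAlphabet, f c = g c) :
    pvMkD f = pvMkD g := by
  unfold pvMkD
  congr 1
  exact List.map_congr_left (fun c hc => by rw [h c hc])

-- inserting at a letter key rewrites that entry in place
theorem pv_insert_mkD (f : Char → Int) (c : Char) (hc : c ∈ pvAlphabet) (v : Int) :
    (pvMkD f).insert (pvKey c) v = pvMkD (fun x => if x = c then v else f x) := by
  apply PySem.Dict.ext
  rw [PySem.Dict.items_insert_of_contains _ _ (pv_contains_mkD f c hc)]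
  simp only [pvMkD]
  rw [List.map_map]
  apply List.map_congr_left
  intro x hx
  by_cases hxc : x = c
  · subst hxc; simp [Function.comp]
  · have hb : (pvKey x == pvKey c) = false := by
      rw [Bool.eq_false_iff]; intro h; exact hxc (pvKey_beq.mp h)
    simp [Function.comp, hb, hxc]

theorem pv_bump_mkD (f : Char → Int) (c : Char) (hc : c ∈ pvAlphabet) (v : Int) :
    pvBumpA (pvMkD f) c v = pvMkD (fun x => if x = c then f x + v else f x) := by
  unfold pvBumpA
  rw [pv_getD_mkD f c hc, pv_insert_mkD f c hc]
  exact pv_mkD_congr (fun x _ => by by_cases hxc : x = c <;> simp [hxc])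

theorem pv_init_eq : pvInitDict = pvMkD (fun _ => 0) := by rfl

-- the `for k in alphabet: changes[k] += tmp[k]*m` loop, on abstracted dicts
theorem pv_foldAdd_mkD (h : Char → Int) (m : Int) :
    ∀ (as : List Char), as.Nodup → (∀ c ∈ as, c ∈ pvAlphabet) → ∀ (g : Char → Int),
      as.foldl (fun d k => pvBumpA d k (h k * m)) (pvMkD g)
        = pvMkD (fun x => if x ∈ as then g x + h x * m else g x) := by
  intro as
  induction as with
  | nil => intro _ _ g; simp
  | cons a as ih =>
    intro hnd hsub g
    simp only [List.foldl_cons]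
    rw [pv_bump_mkD g a (hsub a (by simp)) (h a * m)]
    rw [ih (List.nodup_cons.mp hnd).2 (fun c hc => hsub c (List.mem_cons_of_mem a hc))]
    apply pv_mkD_congr
    intro x _
    have hna : a ∉ as := (List.nodup_cons.mp hnd).1
    by_cases hxa : x = a
    · subst hxa; simp [hna]
    · by_cases hxs : x ∈ as <;> simp [hxa, hxs]

-- ---- takeWhile/dropWhile on a digit run ----
theorem pv_tw_dw (P : Char → Bool) : ∀ (ds u : List Char), (∀ d ∈ ds, P d = true) →
    (u = [] ∨ ∃ c u', u = c :: u' ∧ P c = false) →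
    (ds ++ u).takeWhile P = ds ∧ (ds ++ u).dropWhile P = u := by
  intro ds
  induction ds with
  | nil =>
    intro u _ hu
    rcases hu with rfl | ⟨c, u', rfl, hc⟩
    · simp
    · simp [hc]
  | cons d ds ih =>
    intro u hds hu
    have hd : P d = true := hds d (by simp)
    have h2 := ih u (fun x hx => hds x (by simp [hx])) hu
    simp [hd, h2.1, h2.2]

-- ---- list position helpers ----
theorem pv_drop_head {l : List Char} {i : Nat} {c : Char} {r : List Char} (d : Char)
    (h : l.drop i = c :: r) : l.getD i d = c ∧ i < l.length ∧ l.drop (i + 1) = r := by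
  have hi : i < l.length := by
    by_contra hge
    push Not at hge
    rw [List.drop_eq_nil_of_le hge] at h
    exact List.cons_ne_nil _ _ h.symm
  have h2 := List.drop_eq_getElem_cons hi
  rw [h] at h2
  injection h2 with ha hb
  exact ⟨by rw [List.getD_eq_getElem l d hi, ha], hi, hb.symm⟩

-- ---- pvParRun facts ----
theorem pvParRun_append (a b : List Char) (k : Int) :
    pvParRun (a ++ b) k = (pvParRun a k).bind (pvParRun b) := by
  induction a generalizing k with
  | nil => simp [pvParRun]
  | cons c u ih =>
    simp only [List.cons_append, pvParRun]
    split_ifs <;> simp [ih]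

theorem pvParRun_shift {a : List Char} : ∀ {k m : Int} (j : Int), 0 ≤ j →
    pvParRun a k = some m → pvParRun a (k + j) = some (m + j) := by
  induction a with
  | nil => intro k m j hj h; simp [pvParRun] at h ⊢; omega
  | cons c u ih =>
    intro k m j hj h
    by_cases h1 : c = '('
    · simp only [pvParRun, if_pos h1] at h ⊢
      rw [show k + j + 1 = k + 1 + j by ring]
      exact ih j hj h
    · by_cases h2 : c = ')'
      · simp only [pvParRun, if_neg h1, if_pos h2] at h ⊢
        by_cases h3 : 0 < k
        · rw [if_pos h3] at h
          rw [if_pos (by omega)]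
          rw [show k + j - 1 = k - 1 + j by ring]
          exact ih j hj h
        · rw [if_neg h3] at h; cases h
      · simp only [pvParRun, if_neg h1, if_neg h2] at h ⊢
        exact ih j hj h

theorem pvParRun_split_aux : ∀ (N : Nat) (v : List Char), v.length ≤ N → ∀ (k : Int), 0 ≤ k →
    pvParRun v (k + 1) = some 0 →
    ∃ inner rest, v = inner ++ ')' :: rest ∧ pvParRun inner 0 = some 0 ∧
      pvParRun rest k = some 0 := by
  intro N
  induction N with
  | zero =>
    intro v hv k hk h
    have : v = [] := List.eq_nil_of_length_eq_zero (Nat.le_zero.mp hv)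
    subst this
    simp [pvParRun] at h; omega
  | succ N ih =>
    intro v hv k hk h
    cases v with
    | nil => simp [pvParRun] at h; omega
    | cons c u =>
      have hu : u.length ≤ N := by simpa using Nat.succ_le_succ_iff.mp hv
      by_cases h1 : c = '('
      · subst h1
        simp only [pvParRun] at h
        obtain ⟨i1, r1, rfl, hi1, hr1⟩ := ih u hu (k + 1) (by omega) h
        have hr1' : r1.length ≤ N := by
          simp only [List.length_append, List.length_cons] at hu
          omega
        obtain ⟨i2, r2, rfl, hi2, hr2⟩ := ih r1 hr1' k hk hr1
        refine ⟨'(' :: i1 ++ ')' :: i2, r2, by simp, ?_, hr2⟩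
        have hs : pvParRun i1 (0 + 1) = some (0 + 1) := pvParRun_shift 1 (by omega) hi1
        simp only [zero_add] at hs
        show pvParRun ('(' :: (i1 ++ ')' :: i2)) 0 = some 0
        simp only [pvParRun]
        rw [zero_add, pvParRun_append, hs]
        simp only [Option.bind_some, pvParRun]
        norm_num
        exact hi2
      · by_cases h2 : c = ')'
        · subst h2
          simp only [pvParRun, if_true] at h
          rw [if_pos (by omega : (0:Int) < k + 1)] at h
          refine ⟨[], u, rfl, rfl, ?_⟩
          simpa using h
        · simp only [pvParRun, if_neg h1, if_neg h2] at h
          obtain ⟨i1, r1, rfl, hi1, hr1⟩ := ih u hu k hk h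
          refine ⟨c :: i1, r1, rfl, ?_, hr1⟩
          simpa only [pvParRun, if_neg h1, if_neg h2] using hi1

theorem pvParRun_split (v : List Char) (k : Int) (hk : 0 ≤ k)
    (h : pvParRun v (k + 1) = some 0) :
    ∃ inner rest, v = inner ++ ')' :: rest ∧ pvParRun inner 0 = some 0 ∧
      pvParRun rest k = some 0 :=
  pvParRun_split_aux v.length v le_rfl k hk h

theorem pvDigOk_tail {x : Char} {ys : List Char} (h : pvDigOk (x :: ys) = true) :
    pvDigOk ys = true := by
  cases ys with
  | nil => rfl
  | cons y ys =>
    have h' : (((!(PySem.Chars.isdigit x)) || (y != ')')) && pvDigOk (y :: ys)) = true := h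
    exact (Bool.and_eq_true_iff.mp h').2

theorem pvDigOk_suffix : ∀ (a b : List Char), pvDigOk (a ++ b) = true → pvDigOk b = true := by
  intro a
  induction a with
  | nil => intro b h; exact h
  | cons x a ih => intro b h; exact ih b (pvDigOk_tail h)

theorem pvDigOk_run : ∀ (ds u : List Char), (∀ d ∈ ds, PySem.Chars.isdigit d = true) →
    ds ≠ [] → pvDigOk (ds ++ u) = true →
    ∃ c u', u = c :: u' ∧ c ≠ ')' := by
  intro ds
  induction ds with
  | nil => intro u _ hne _; exact absurd rfl hne
  | cons d ds ih =>
    intro u hds _ h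
    cases ds with
    | nil =>
      cases u with
      | nil =>
        have hd : PySem.Chars.isdigit d = true := hds d (by simp)
        have h' : (!(PySem.Chars.isdigit d)) = true := h
        rw [hd] at h'; cases h'
      | cons c u' =>
        have h' : (((!(PySem.Chars.isdigit d)) || (c != ')')) && pvDigOk (c :: u')) = true := h
        have hd : PySem.Chars.isdigit d = true := hds d (by simp)
        have := (Bool.and_eq_true_iff.mp h').1
        rw [hd] at this
        simp only [Bool.not_true, Bool.false_or, bne_iff_ne, ne_eq] at this
        exact ⟨c, u', rfl, this⟩
    | cons d2 ds2 =>
      exact ih u (fun x hx => hds x (List.mem_cons_of_mem d hx)) (by simp) (pvDigOk_tail h)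

theorem pvDigOk_split : ∀ (inner rest : List Char),
    pvDigOk (inner ++ ')' :: rest) = true → pvDigOk inner = true ∧ pvDigOk rest = true := by
  intro inner
  induction inner with
  | nil => intro rest h; exact ⟨rfl, pvDigOk_tail h⟩
  | cons x i ih =>
    intro rest h
    cases i with
    | nil =>
      have h' : (((!(PySem.Chars.isdigit x)) || (')' != ')')) && pvDigOk (')' :: rest)) = true := h
      obtain ⟨h1, h2⟩ := Bool.and_eq_true_iff.mp h'
      refine ⟨?_, pvDigOk_tail h2⟩
      show (!(PySem.Chars.isdigit x)) = true
      simpa using h1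
    | cons y i' =>
      have h' : pvDigOk ((y :: i') ++ ')' :: rest) = true := pvDigOk_tail h
      obtain ⟨hi, hr⟩ := ih rest h'
      refine ⟨?_, hr⟩
      have hc : ((!(PySem.Chars.isdigit x)) || (y != ')')) = true := by
        have hh : (((!(PySem.Chars.isdigit x)) || (y != ')')) && pvDigOk (y :: (i' ++ ')' :: rest))) = true := h
        exact (Bool.and_eq_true_iff.mp hh).1
      show (((!(PySem.Chars.isdigit x)) || (y != ')')) && pvDigOk (y :: i')) = true
      rw [hc, hi]; rfl

-- ---- completeness: Pre ⇒ a derivation ----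
theorem pv_parRun_neutral : ∀ (a : List Char) (k : Int), (∀ c ∈ a, c ≠ '(' ∧ c ≠ ')') →
    pvParRun a k = some k := by
  intro a
  induction a with
  | nil => intro k _; rfl
  | cons c u ih =>
    intro k h
    have hc := h c (by simp)
    simp only [pvParRun, if_neg hc.1, if_neg hc.2]
    exact ih k (fun x hx => h x (List.mem_cons_of_mem c hx))

theorem pv_dropWhile_head (p : Char → Bool) : ∀ (l : List Char) {e : Char} {u : List Char},
    l.dropWhile p = e :: u → p e = false := by
  intro l
  induction l with
  | nil => intro e u h; cases h
  | cons x xs ih =>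
    intro e u h
    rw [List.dropWhile_cons] at h
    by_cases hx : p x = true
    · rw [if_pos hx] at h; exact ih h
    · rw [if_neg hx] at h
      injection h with h1 _
      subst h1
      simpa using hx

theorem pv_digits_not_paren {a : List Char} (h : ∀ d ∈ a, PySem.Chars.isdigit d = true) :
    ∀ c ∈ a, c ≠ '(' ∧ c ≠ ')' := fun c hc =>
  ⟨(pv_digit_facts (h c hc)).1, (pv_digit_facts (h c hc)).2.1⟩

theorem pv_valid_of_pre_aux : ∀ (N : Nat) (t : List Char), t.length ≤ N →
    (∀ c ∈ t, c ∈ pvAlphabet ∨ PySem.Chars.isdigit c = true ∨ c = '(' ∨ c = ')') →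
    pvDigOk t = true → pvParRun t 0 = some 0 → pvValid t := by
  intro N
  induction N with
  | zero =>
    intro t ht _ _ _
    have h0 : t = [] := List.eq_nil_of_length_eq_zero (Nat.le_zero.mp ht)
    subst h0; exact .nil
  | succ N ih =>
    intro t ht hok hdg hpar
    have hsplit : t.takeWhile PySem.Chars.isdigit ++ t.dropWhile PySem.Chars.isdigit = t :=
      List.takeWhile_append_dropWhile
    have hds : ∀ d ∈ t.takeWhile PySem.Chars.isdigit, PySem.Chars.isdigit d = true :=
      fun d hd => List.mem_takeWhile_imp hd
    cases hu : t.dropWhile PySem.Chars.isdigit with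
    | nil =>
      rw [hu, List.append_nil] at hsplit
      by_cases hdsnil : t.takeWhile PySem.Chars.isdigit = []
      · rw [hdsnil] at hsplit; rw [← hsplit]; exact .nil
      · obtain ⟨c, u', hcu, _⟩ :=
          pvDigOk_run (t.takeWhile PySem.Chars.isdigit) [] hds hdsnil
            (by rw [List.append_nil, hsplit]; exact hdg)
        cases hcu
    | cons e u' =>
      have hnd : PySem.Chars.isdigit e = false := pv_dropWhile_head _ t hu
      rw [hu] at hsplit
      have ht_eq : t = t.takeWhile PySem.Chars.isdigit ++ e :: u' := hsplit.symm
      have hoke := hok e (by rw [ht_eq]; exact List.mem_append_right _ (by simp))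
      have hpar2 : pvParRun (e :: u') 0 = some 0 := by
        rw [ht_eq, pvParRun_append,
          pv_parRun_neutral _ 0 (pv_digits_not_paren hds)] at hpar
        simpa using hpar
      have hlen := congrArg List.length hsplit
      simp only [List.length_append, List.length_cons] at hlen
      rcases hoke with halpha | hdig | hlp | hrp
      · -- letter item
        have he := pv_alpha_facts e halpha
        have hv' : pvValid u' := by
          refine ih u' (by omega) (fun c hc => hok c (by rw [ht_eq]; simp [hc])) ?_ ?_
          · exact pvDigOk_tail (pvDigOk_suffix _ _ (ht_eq ▸ hdg))
          · simpa [pvParRun, he.1, he.2.1] using hpar2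
        exact ht_eq ▸ pvValid.letter _ e u' hds halpha hv'
      · rw [hdig] at hnd; cases hnd
      · -- group item
        subst hlp
        have hpar3 : pvParRun u' (0 + 1) = some 0 := by
          simpa [pvParRun] using hpar2
        obtain ⟨inner, rest, rfl, hinner, hrest⟩ := pvParRun_split u' 0 le_rfl hpar3
        have hdgir : pvDigOk (inner ++ ')' :: rest) = true :=
          pvDigOk_tail (pvDigOk_suffix _ _ (ht_eq ▸ hdg))
        obtain ⟨hdgi, hdgr⟩ := pvDigOk_split inner rest hdgir
        simp only [List.length_append, List.length_cons] at hlen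
        have hvi : pvValid inner := by
          refine ih inner (by omega)
            (fun c hc => hok c (by rw [ht_eq]; simp [hc])) hdgi hinner
        have hvr : pvValid rest := by
          refine ih rest (by omega)
            (fun c hc => hok c (by rw [ht_eq]; simp [hc])) hdgr hrest
        have hres := pvValid.group _ inner rest hds hvi hvr
        rw [ht_eq]
        simpa [List.cons_append, List.append_assoc] using hres
      · subst hrp
        simp [pvParRun] at hpar2

theorem pv_valid_of_pre (t : List Char)
    (hok : ∀ c ∈ t, c ∈ pvAlphabet ∨ PySem.Chars.isdigit c = true ∨ c = '(' ∨ c = ')')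
    (hdg : pvDigOk t = true) (hpar : pvParRun t 0 = some 0) : pvValid t :=
  pv_valid_of_pre_aux t.length t le_rfl hok hdg hpar

-- ---- reference count: locality / fuel-irrelevance ----
-- controlled one-step unfoldings of pvCntF
theorem pvCntF_letter_step (f : Nat) (ds : List Char)
    (hds : ∀ d ∈ ds, PySem.Chars.isdigit d = true) (c : Char)
    (hc : PySem.Chars.isdigit c = false) (h1 : c ≠ ')') (h2 : c ≠ '(') (u : List Char) :
    pvCntF (f + 1) (ds ++ c :: u) =
      ((fun x => if x = c then (pvCntF f u).1 x +
          (if ds = [] then 1 else (PySem.Int.ofChars? ds).getD 0)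
        else (pvCntF f u).1 x), (pvCntF f u).2) := by
  have h := pv_tw_dw PySem.Chars.isdigit ds (c :: u) hds (Or.inr ⟨c, u, rfl, hc⟩)
  simp only [pvCntF, h.1, h.2, if_neg h1, if_neg h2]

theorem pvCntF_close_step (f : Nat) (ds : List Char)
    (hds : ∀ d ∈ ds, PySem.Chars.isdigit d = true) (u : List Char) :
    pvCntF (f + 1) (ds ++ ')' :: u) = ((fun _ => 0), ')' :: u) := by
  have h := pv_tw_dw PySem.Chars.isdigit ds (')' :: u) hds (Or.inr ⟨')', u, rfl, by decide⟩)
  simp only [pvCntF, h.1, h.2]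
  rw [if_pos trivial]

theorem pvCntF_open_step (f : Nat) (ds : List Char)
    (hds : ∀ d ∈ ds, PySem.Chars.isdigit d = true) (u : List Char) :
    pvCntF (f + 1) (ds ++ '(' :: u) =
      ((fun x => (if ds = [] then 1 else (PySem.Int.ofChars? ds).getD 0) * (pvCntF f u).1 x +
          (pvCntF f ((pvCntF f u).2.tail)).1 x), (pvCntF f ((pvCntF f u).2.tail)).2) := by
  have h := pv_tw_dw PySem.Chars.isdigit ds ('(' :: u) hds (Or.inr ⟨'(', u, rfl, by decide⟩)
  simp only [pvCntF, h.1, h.2]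
  rw [if_neg (by decide : ¬ ('(' = ')'))]
  rw [if_pos trivial]

theorem pvCntF_closed : ∀ {t : List Char}, pvValid t → ∀ (r : List Char),
    (r = [] ∨ ∃ r', r = ')' :: r') → ∀ (f : Nat), t.length < f →
    pvCntF f (t ++ r) = (pvCnt t, r) := by
  intro t hv
  induction hv with
  | nil =>
    intro r hr f hf
    cases f with
    | zero => omega
    | succ f =>
      rcases hr with rfl | ⟨r', rfl⟩
      · simp [pvCntF, pvCnt]
      · rw [List.nil_append]
        have h := pvCntF_close_step f [] (by simp) r'
        rw [List.nil_append] at h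
        rw [h, pvCnt]
        rfl
  | letter ds c t hds hc ht iht =>
    intro r hr f hf
    cases f with
    | zero => omega
    | succ f =>
      have hfacts := pv_alpha_facts c hc
      have hlen : (ds ++ c :: t).length = ds.length + t.length + 1 := by
        simp [List.length_append]; omega
      have e1 : (ds ++ c :: t) ++ r = ds ++ c :: (t ++ r) := by simp
      rw [e1, pvCntF_letter_step f ds hds c hfacts.2.2.2 hfacts.2.1 hfacts.1 (t ++ r)]
      rw [iht r hr f (by omega)]
      have hR : pvCnt (ds ++ c :: t) = fun x => if x = c then pvCnt t x +
          (if ds = [] then 1 else (PySem.Int.ofChars? ds).getD 0) else pvCnt t x := by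
        show (pvCntF ((ds ++ c :: t).length + 1) (ds ++ c :: t)).1 = _
        rw [pvCntF_letter_step ((ds ++ c :: t).length) ds hds c hfacts.2.2.2 hfacts.2.1
          hfacts.1 t]
        have h2 := iht [] (Or.inl rfl) (ds ++ c :: t).length (by omega)
        rw [List.append_nil] at h2
        rw [h2]
      rw [hR]
  | group ds inner t hds hin ht ihin iht =>
    intro r hr f hf
    cases f with
    | zero => omega
    | succ f =>
      have hlen : (ds ++ '(' :: inner ++ ')' :: t).length
          = ds.length + inner.length + t.length + 2 := by
        simp [List.length_append]; omega
      have e1 : (ds ++ '(' :: inner ++ ')' :: t) ++ r = ds ++ '(' :: (inner ++ ')' :: (t ++ r)) := by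
        simp
      rw [e1, pvCntF_open_step f ds hds (inner ++ ')' :: (t ++ r))]
      rw [ihin (')' :: (t ++ r)) (Or.inr ⟨t ++ r, rfl⟩) f (by omega)]
      simp only [List.tail_cons]
      rw [iht r hr f (by omega)]
      have hR : pvCnt (ds ++ '(' :: inner ++ ')' :: t) = fun x =>
          (if ds = [] then 1 else (PySem.Int.ofChars? ds).getD 0) * pvCnt inner x + pvCnt t x := by
        show (pvCntF ((ds ++ '(' :: inner ++ ')' :: t).length + 1) (ds ++ '(' :: inner ++ ')' :: t)).1 = _
        have e2 : ds ++ '(' :: inner ++ ')' :: t = ds ++ '(' :: (inner ++ ')' :: (t ++ [])) := by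
          simp
        rw [e2, pvCntF_open_step ((ds ++ '(' :: (inner ++ ')' :: (t ++ []))).length) ds hds
          (inner ++ ')' :: (t ++ []))]
        rw [ihin (')' :: (t ++ [])) (Or.inr ⟨t ++ [], rfl⟩) _
          (by simp [List.length_append]; omega)]
        simp only [List.tail_cons]
        rw [iht [] (Or.inl rfl) _ (by simp [List.length_append]; omega)]
      rw [hR]

theorem pvCnt_nil : pvCnt [] = fun _ => 0 := by rfl

theorem pvCnt_letter {ds : List Char} {c : Char} {t : List Char}
    (hds : ∀ d ∈ ds, PySem.Chars.isdigit d = true) (hc : c ∈ pvAlphabet) (ht : pvValid t) :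
    pvCnt (ds ++ c :: t)
      = fun x => if x = c then pvCnt t x + (if ds = [] then 1 else (PySem.Int.ofChars? ds).getD 0)
                 else pvCnt t x := by
  have hfacts := pv_alpha_facts c hc
  show (pvCntF ((ds ++ c :: t).length + 1) (ds ++ c :: t)).1 = _
  rw [pvCntF_letter_step ((ds ++ c :: t).length) ds hds c hfacts.2.2.2 hfacts.2.1 hfacts.1 t]
  have h2 := pvCntF_closed ht [] (Or.inl rfl) (ds ++ c :: t).length
    (by simp [List.length_append]; omega)
  rw [List.append_nil] at h2
  rw [h2]

theorem pvCnt_group {ds inner t : List Char}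
    (hds : ∀ d ∈ ds, PySem.Chars.isdigit d = true) (hin : pvValid inner) (ht : pvValid t) :
    pvCnt (ds ++ '(' :: inner ++ ')' :: t)
      = fun x => (if ds = [] then 1 else (PySem.Int.ofChars? ds).getD 0) * pvCnt inner x
                 + pvCnt t x := by
  have hlen : (ds ++ '(' :: inner ++ ')' :: t).length
      = ds.length + inner.length + t.length + 2 := by
    simp [List.length_append]; omega
  show (pvCntF ((ds ++ '(' :: inner ++ ')' :: t).length + 1) (ds ++ '(' :: inner ++ ')' :: t)).1 = _
  have e2 : ds ++ '(' :: inner ++ ')' :: t = ds ++ '(' :: (inner ++ ')' :: (t ++ [])) := by simp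
  rw [e2, pvCntF_open_step ((ds ++ '(' :: (inner ++ ')' :: (t ++ []))).length) ds hds
    (inner ++ ')' :: (t ++ []))]
  rw [pvCntF_closed hin (')' :: (t ++ [])) (Or.inr ⟨t ++ [], rfl⟩) _
    (by simp [List.length_append]; omega)]
  simp only [List.tail_cons]
  rw [pvCntF_closed ht [] (Or.inl rfl) _ (by simp [List.length_append]; omega)]

-- ---- position helpers ----
theorem pv_drop_len {l t : List Char} {i : Nat} (h : l.drop i = t) (hi : i ≤ l.length) :
    i + t.length = l.length := by
  have := congrArg List.length h
  simp [List.length_drop] at this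
  omega

theorem pv_drop_shift {l a b : List Char} {i : Nat} (h : l.drop i = a ++ b) :
    l.drop (i + a.length) = b := by
  have h2 : l.drop (i + a.length) = (l.drop i).drop a.length := by
    rw [List.drop_drop, Nat.add_comm]
  rw [h2, h, List.drop_left]

theorem pv_drop_ne_nil_lt {l : List Char} {i : Nat} {c : Char} {r : List Char}
    (h : l.drop i = c :: r) : i < l.length := (pv_drop_head ' ' h).2.1

-- a derivable string is balanced
theorem pv_valid_parRun : ∀ {t : List Char}, pvValid t → pvParRun t 0 = some 0 := by
  intro t hv
  induction hv with
  | nil => rfl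
  | letter ds c t hds hc _ iht =>
    rw [pvParRun_append, pv_parRun_neutral ds 0 (pv_digits_not_paren hds)]
    have he := pv_alpha_facts c hc
    simpa [pvParRun, he.1, he.2.1] using iht
  | group ds inner t hds _ _ ihin iht =>
    have e1 : ds ++ '(' :: inner ++ ')' :: t = ds ++ ('(' :: (inner ++ ')' :: t)) := by simp
    rw [e1, pvParRun_append, pv_parRun_neutral ds 0 (pv_digits_not_paren hds)]
    simp only [Option.bind_some, pvParRun, reduceIte]
    rw [zero_add, pvParRun_append]
    have hs : pvParRun inner (0 + 1) = some (0 + 1) := pvParRun_shift 1 (by omega) ihin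
    simp only [zero_add] at hs
    rw [hs]
    simp only [Option.bind_some, pvParRun, reduceIte]
    simpa using iht

-- ---- B-side loop lemmas ----
theorem pvSkipDigitsB_run (l : List Char) :
    ∀ (ds : List Char), (∀ d ∈ ds, PySem.Chars.isdigit d = true) → ∀ (u : List Char),
    (u = [] ∨ ∃ c u', u = c :: u' ∧ PySem.Chars.isdigit c = false) →
    ∀ (i : Nat), i ≤ l.length → l.drop i = ds ++ u →
    pvSkipDigitsB l l.length (l.length + 1 - i) i = i + ds.length := by
  intro ds
  induction ds with
  | nil =>
    intro _ u hu i hi hdrop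
    rw [List.nil_append] at hdrop
    rcases hu with rfl | ⟨c, u', rfl, hc⟩
    · have hn : l.length ≤ i := List.drop_eq_nil_iff.mp hdrop
      have hfe : l.length + 1 - i = 1 := by omega
      rw [hfe]
      simp [pvSkipDigitsB, show ¬ (i < l.length) from by omega]
    · have hlt : i < l.length := pv_drop_ne_nil_lt hdrop
      have hg : l.getD i ' ' = c := (pv_drop_head ' ' hdrop).1
      have hfe : l.length + 1 - i = (l.length - i) + 1 := by omega
      have hcnd : ¬ (i < l.length ∧ PySem.Chars.isdigit (l.getD i ' ') = true) := by
        intro hcc; rw [hg, hc] at hcc; exact Bool.false_ne_true hcc.2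
      rw [hfe]
      simp only [pvSkipDigitsB, if_neg hcnd]
      simp
  | cons d ds ih =>
    intro hds u hu i hi hdrop
    have hlt : i < l.length := pv_drop_ne_nil_lt (by simpa using hdrop)
    have hg : l.getD i ' ' = d := (pv_drop_head ' ' (by simpa using hdrop)).1
    have hfe : l.length + 1 - i = (l.length + 1 - (i + 1)) + 1 := by omega
    have hdrop' : l.drop (i + 1) = ds ++ u := (pv_drop_head ' ' (by simpa using hdrop)).2.2
    have hcnd : i < l.length ∧ PySem.Chars.isdigit (l.getD i ' ') = true :=
      ⟨hlt, by rw [hg]; exact hds d (by simp)⟩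
    rw [hfe]
    simp only [pvSkipDigitsB, if_pos hcnd]
    rw [ih (fun x hx => hds x (by simp [hx])) u hu (i + 1) (by omega) hdrop']
    simp only [List.length_cons]
    omega

-- `d.modify k 0 (· + v)` is the same update as A's bump (definitional)
theorem pv_modify_eq_bump (d : PySem.Dict String Int) (c : Char) (v : Int) :
    d.modify (pvKey c) 0 (· + v) = pvBumpA d c v := rfl

theorem pv_foldAddB_mkD (h0 : PySem.Dict String Int) (m : Int) :
    ∀ (as : List Char), as.Nodup → (∀ c ∈ as, c ∈ pvAlphabet) → ∀ (g : Char → Int),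
      as.foldl (fun d c => d.modify (pvKey c) 0 (· + h0.getD (pvKey c) 0 * m)) (pvMkD g)
        = pvMkD (fun x => if x ∈ as then g x + h0.getD (pvKey x) 0 * m else g x) := by
  intro as hnd hsub g
  simp only [pv_modify_eq_bump]
  exact pv_foldAdd_mkD (fun c => h0.getD (pvKey c) 0) m as hnd hsub g

theorem pv_alphabet_nodup : pvAlphabet.Nodup := by decide

theorem pvParseB_spec (l : List Char) :
    ∀ {t : List Char}, pvValid t → ∀ (r : List Char), (r = [] ∨ ∃ r', r = ')' :: r') →
    ∀ (i : Nat), i ≤ l.length → l.drop i = t ++ r → ∀ (f : Nat), 2 * t.length < f →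
    ∀ (g : Char → Int),
    pvParseB l l.length f i (pvMkD g) = (pvMkD (fun x => g x + pvCnt t x), i + t.length) := by
  intro t hv
  induction hv with
  | nil =>
    intro r hr i hi hdrop f hf g
    cases f with
    | zero => omega
    | succ f =>
      rw [List.nil_append] at hdrop
      have hcond : ¬ (i < l.length ∧ l.getD i ' ' ≠ ')') := by
        rcases hr with rfl | ⟨r', rfl⟩
        · have := List.drop_eq_nil_iff.mp hdrop; omega
        · have := (pv_drop_head ' ' hdrop).1
          intro hcc; exact hcc.2 this
      simp only [pvParseB, if_neg hcond]
      rw [Prod.mk.injEq]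
      exact ⟨congrArg pvMkD (funext fun x => by rw [pvCnt_nil]; ring), by simp⟩
  | letter ds c t hds hc ht iht =>
    intro r hr i hi hdrop f hf g
    cases f with
    | zero => omega
    | succ f =>
      have he := pv_alpha_facts c hc
      have hdrop1 : l.drop i = ds ++ (c :: (t ++ r)) := by simpa using hdrop
      have hi_lt : i < l.length := by
        cases ds with
        | nil =>
          exact pv_drop_ne_nil_lt (show l.drop i = c :: (t ++ r) from by simpa using hdrop1)
        | cons d0 ds0 =>
          exact pv_drop_ne_nil_lt
            (show l.drop i = d0 :: (ds0 ++ c :: (t ++ r)) from by simpa using hdrop1)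
      have hcond : i < l.length ∧ l.getD i ' ' ≠ ')' := by
        refine ⟨hi_lt, ?_⟩
        cases ds with
        | nil =>
          have hh : l.drop i = c :: (t ++ r) := by simpa using hdrop1
          rw [(pv_drop_head ' ' hh).1]
          exact he.2.1
        | cons d0 ds0 =>
          have hh : l.drop i = d0 :: (ds0 ++ c :: (t ++ r)) := by simpa using hdrop1
          rw [(pv_drop_head ' ' hh).1]
          exact (pv_digit_facts (hds d0 (by simp))).2.1
      simp only [pvParseB, if_pos hcond]
      rw [pvSkipDigitsB_run l ds hds (c :: (t ++ r))
        (Or.inr ⟨c, t ++ r, rfl, he.2.2.2⟩) i hi hdrop1]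
      have hdropc : l.drop (i + ds.length) = c :: (t ++ r) := pv_drop_shift hdrop1
      have hgc : l.getD (i + ds.length) ' ' = c := (pv_drop_head ' ' hdropc).1
      have hclt : i + ds.length < l.length := pv_drop_ne_nil_lt hdropc
      have hnotpar : ¬ (i + ds.length < l.length ∧ l.getD (i + ds.length) ' ' = '(') := by
        intro hcc; rw [hgc] at hcc; exact he.1 hcc.2
      rw [if_neg hnotpar, if_pos hclt]
      have hmult :
          (if i < i + ds.length then
            (PySem.Int.ofChars? (PySem.List.slice l (some (i : Int))
              (some ((i + ds.length : Nat) : Int)))).getD 0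
          else 1) = (if ds = [] then 1 else (PySem.Int.ofChars? ds).getD 0) := by
        by_cases hds0 : ds = []
        · simp [hds0]
        · have hpos : 0 < ds.length := List.length_pos_of_ne_nil hds0
          rw [if_pos (by omega), if_neg hds0]
          rw [PySem.List.slice_natCast]
          rw [show i + ds.length - i = ds.length from by omega]
          rw [hdrop1, List.take_left]
      rw [hmult, hgc, pv_modify_eq_bump]
      rw [pv_bump_mkD g c hc _]
      have hLen : (ds ++ c :: t).length = ds.length + t.length + 1 := by
        simp [List.length_append]; omega
      rw [iht r hr (i + ds.length + 1) (by omega) (pv_drop_head ' ' hdropc).2.2 f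
        (by omega) _]
      rw [Prod.mk.injEq]
      constructor
      · apply pv_mkD_congr
        intro x _
        rw [pvCnt_letter hds hc ht]
        by_cases hxc : x = c
        · subst hxc; simp; ring
        · simp [hxc]
      · omega
  | group ds inner t hds hin ht ihin iht =>
    intro r hr i hi hdrop f hf g
    cases f with
    | zero => omega
    | succ f =>
      have hLen : (ds ++ '(' :: inner ++ ')' :: t).length
          = ds.length + inner.length + t.length + 2 := by
        simp [List.length_append]; omega
      have hdrop1 : l.drop i = ds ++ ('(' :: (inner ++ ')' :: (t ++ r))) := by simpa using hdrop
      have hi_lt : i < l.length := by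
        cases ds with
        | nil =>
          exact pv_drop_ne_nil_lt
            (show l.drop i = '(' :: (inner ++ ')' :: (t ++ r)) from by simpa using hdrop1)
        | cons d0 ds0 =>
          exact pv_drop_ne_nil_lt
            (show l.drop i = d0 :: (ds0 ++ '(' :: (inner ++ ')' :: (t ++ r))) from by
              simpa using hdrop1)
      have hcond : i < l.length ∧ l.getD i ' ' ≠ ')' := by
        refine ⟨hi_lt, ?_⟩
        cases ds with
        | nil =>
          have hh : l.drop i = '(' :: (inner ++ ')' :: (t ++ r)) := by simpa using hdrop1
          rw [(pv_drop_head ' ' hh).1]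
          decide
        | cons d0 ds0 =>
          have hh : l.drop i = d0 :: (ds0 ++ '(' :: (inner ++ ')' :: (t ++ r))) := by
            simpa using hdrop1
          rw [(pv_drop_head ' ' hh).1]
          exact (pv_digit_facts (hds d0 (by simp))).2.1
      simp only [pvParseB, if_pos hcond]
      rw [pvSkipDigitsB_run l ds hds ('(' :: (inner ++ ')' :: (t ++ r)))
        (Or.inr ⟨'(', inner ++ ')' :: (t ++ r), rfl, by decide⟩) i hi hdrop1]
      have hdropc : l.drop (i + ds.length) = '(' :: (inner ++ ')' :: (t ++ r)) :=
        pv_drop_shift hdrop1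
      have hgc : l.getD (i + ds.length) ' ' = '(' := (pv_drop_head ' ' hdropc).1
      have hclt : i + ds.length < l.length := pv_drop_ne_nil_lt hdropc
      rw [if_pos ⟨hclt, hgc⟩]
      have hmult :
          (if i < i + ds.length then
            (PySem.Int.ofChars? (PySem.List.slice l (some (i : Int))
              (some ((i + ds.length : Nat) : Int)))).getD 0
          else 1) = (if ds = [] then 1 else (PySem.Int.ofChars? ds).getD 0) := by
        by_cases hds0 : ds = []
        · simp [hds0]
        · have hpos : 0 < ds.length := List.length_pos_of_ne_nil hds0
          rw [if_pos (by omega), if_neg hds0]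
          rw [PySem.List.slice_natCast]
          rw [show i + ds.length - i = ds.length from by omega]
          rw [hdrop1, List.take_left]
      rw [hmult, pv_init_eq]
      have hdropin : l.drop (i + ds.length + 1) = inner ++ (')' :: (t ++ r)) :=
        (pv_drop_head ' ' hdropc).2.2
      rw [ihin (')' :: (t ++ r)) (Or.inr ⟨t ++ r, rfl⟩) (i + ds.length + 1) (by omega)
        hdropin f (by omega) (fun _ => 0)]
      have hdropr : l.drop (i + ds.length + 1 + inner.length) = ')' :: (t ++ r) :=
        pv_drop_shift hdropin
      have hrlt : i + ds.length + 1 + inner.length < l.length := pv_drop_ne_nil_lt hdropr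
      have hdropt : l.drop (i + ds.length + 1 + inner.length + 1) = t ++ r :=
        (pv_drop_head ' ' hdropr).2.2
      rw [pv_foldAddB_mkD (pvMkD fun x => (fun _ => (0:Int)) x + pvCnt inner x)
        (if ds = [] then 1 else (PySem.Int.ofChars? ds).getD 0) pvAlphabet
        pv_alphabet_nodup (fun c hc => hc) g]
      rw [iht r hr (i + ds.length + 1 + inner.length + 1) (by omega) hdropt f (by omega) _]
      rw [Prod.mk.injEq]
      constructor
      · apply pv_mkD_congr
        intro x hx
        rw [pvCnt_group hds hin ht]
        rw [if_pos hx, pv_getD_mkD _ x hx]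
        ring
      · omega

-- ---- A-side: sentinel-string helpers ----
theorem pv_s_drop {l : List Char} {i : Nat} (hi : i ≤ l.length) :
    (l ++ ['#']).drop i = l.drop i ++ ['#'] := List.drop_append_of_le_length hi

theorem pv_s_getD {l : List Char} {i : Nat} {c : Char} {r : List Char}
    (h : l.drop i = c :: r) : (l ++ ['#']).getD i '#' = c := by
  have hi := pv_drop_ne_nil_lt h
  have hdx : (l ++ ['#']).drop i = c :: (r ++ ['#']) := by
    rw [pv_s_drop (le_of_lt hi), h]; simp
  exact (pv_drop_head '#' hdx).1

theorem pv_drop_head? {l : List Char} {i : Nat} {c : Char} {r : List Char}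
    (h : l.drop i = c :: r) : l[i]? = some c := by
  have hi : i < l.length := pv_drop_ne_nil_lt h
  have h2 := List.drop_eq_getElem_cons hi
  rw [h] at h2
  injection h2 with ha _
  rw [List.getElem?_eq_getElem hi, ← ha]

theorem pv_s_get? {l : List Char} {i : Nat} {c : Char} {r : List Char}
    (h : l.drop i = c :: r) : (l ++ ['#'])[i]? = some c := by
  have hi := pv_drop_ne_nil_lt h
  have hdx : (l ++ ['#']).drop i = c :: (r ++ ['#']) := by
    rw [pv_s_drop (le_of_lt hi), h]; simp
  exact pv_drop_head? hdx

theorem pv_s_get?_end (l : List Char) : (l ++ ['#'])[l.length]? = some '#' := by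
  have hdx : (l ++ ['#']).drop l.length = '#' :: [] := by
    rw [pv_s_drop le_rfl, List.drop_length]; rfl
  exact pv_drop_head? hdx

-- ---- A-side loop lemmas ----
theorem pvLettersA_run (l : List Char) :
    ∀ (p : List Char), (∀ c ∈ p, c ∈ pvAlphabet) → ∀ (u : List Char),
    (u = [] ∨ ∃ c u', u = c :: u' ∧ (PySem.Chars.isdigit c = true ∨ c = '(' ∨ c = ')')) →
    ∀ (i : Nat), i ≤ l.length → l.drop i = p ++ u → ∀ (d : PySem.Dict String Int),
    pvLettersA (l ++ ['#']) (l.length + 1 - i) i d =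
      (if u = [] then Sum.inl (p.foldl (fun d c => pvBumpA d c 1) d)
       else Sum.inr (i + p.length, p.foldl (fun d c => pvBumpA d c 1) d)) := by
  intro p
  induction p with
  | nil =>
    intro _ u hu i hi hdrop d
    rw [List.nil_append] at hdrop
    rcases hu with rfl | ⟨c, u', rfl, hc⟩
    · have hn : l.length ≤ i := List.drop_eq_nil_iff.mp hdrop
      have hie : i = l.length := by omega
      subst hie
      rw [show l.length + 1 - l.length = 1 from by omega]
      simp [pvLettersA]
    · have hlt := pv_drop_ne_nil_lt hdrop
      have hg := pv_s_getD hdrop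
      have hne : ¬ (c = '#') := by
        rcases hc with h | h | h
        · exact (pv_digit_facts h).2.2.1
        · subst h; decide
        · subst h; decide
      have hnc : ¬ (c ≠ '(' ∧ PySem.Chars.isdigit c = false ∧ c ≠ ')') := by
        rcases hc with h | h | h
        · intro hcc; rw [h] at hcc; exact absurd hcc.2.1 (by decide)
        · intro hcc; exact hcc.1 h
        · intro hcc; exact hcc.2.2 h
      rw [show l.length + 1 - i = (l.length - i) + 1 from by omega]
      simp [pvLettersA, pv_s_get? hdrop, hne, hnc]
  | cons a p ih =>
    intro hp u hu i hi hdrop d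
    have hdrop1 : l.drop i = a :: (p ++ u) := by simpa using hdrop
    have hlt := pv_drop_ne_nil_lt hdrop1
    have hg := pv_s_getD hdrop1
    have ha := pv_alpha_facts a (hp a (by simp))
    have hcnd : a ≠ '(' ∧ PySem.Chars.isdigit a = false ∧ a ≠ ')' := ⟨ha.1, ha.2.2.2, ha.2.1⟩
    rw [show l.length + 1 - i = (l.length + 1 - (i + 1)) + 1 from by omega]
    simp only [pvLettersA, hg, if_neg ha.2.2.1, if_pos hcnd]
    rw [ih (fun x hx => hp x (by simp [hx])) u hu (i + 1) (by omega)
      (pv_drop_head ' ' hdrop1).2.2 (pvBumpA d a 1)]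
    by_cases hu0 : u = []
    · simp [hu0]
    · simp only [if_neg hu0, List.foldl_cons, Sum.inr.injEq, Prod.mk.injEq,
        List.length_cons]
      exact ⟨by omega, trivial⟩

theorem pvNumA_run (l : List Char) :
    ∀ (ds : List Char), (∀ d ∈ ds, PySem.Chars.isdigit d = true) → ∀ (u : List Char),
    (u = [] ∨ ∃ c u', u = c :: u' ∧ PySem.Chars.isdigit c = false) →
    ∀ (i : Nat), i ≤ l.length → l.drop i = ds ++ u → ∀ (acc : List Char),
    pvNumA (l ++ ['#']) (l.length + 1 - i) i acc = (i + ds.length, acc ++ ds) := by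
  intro ds
  induction ds with
  | nil =>
    intro _ u hu i hi hdrop acc
    rw [List.nil_append] at hdrop
    rcases hu with rfl | ⟨c, u', rfl, hc⟩
    · have hn : l.length ≤ i := List.drop_eq_nil_iff.mp hdrop
      have hie : i = l.length := by omega
      subst hie
      rw [show l.length + 1 - l.length = 1 from by omega]
      simp [pvNumA, (by decide : PySem.Chars.isdigit '#' = false)]
    · have hg := pv_s_getD hdrop
      rw [show l.length + 1 - i = (l.length - i) + 1 from by
        have := pv_drop_ne_nil_lt hdrop; omega]
      simp [pvNumA, pv_s_get? hdrop, hc]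
  | cons d0 ds ih =>
    intro hds u hu i hi hdrop acc
    have hdrop1 : l.drop i = d0 :: (ds ++ u) := by simpa using hdrop
    have hlt := pv_drop_ne_nil_lt hdrop1
    have hg := pv_s_getD hdrop1
    rw [show l.length + 1 - i = (l.length + 1 - (i + 1)) + 1 from by omega]
    simp only [pvNumA, hg, if_pos (hds d0 (by simp))]
    rw [ih (fun x hx => hds x (by simp [hx])) u hu (i + 1) (by omega)
      (pv_drop_head ' ' hdrop1).2.2 (acc ++ [d0])]
    simp only [Prod.mk.injEq, List.length_cons, List.append_assoc, List.cons_append,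
      List.nil_append]
    exact ⟨by omega, trivial⟩

theorem pvParenA_run (l : List Char) :
    ∀ (u : List Char) (i : Nat) (q : Int) (r : List Char), 0 ≤ q →
    pvParRun u q = some 0 → (l ++ ['#']).drop i = u ++ ')' :: r →
    pvParenA (l ++ ['#']) (l.length + 2 - i) i (q + 1) = i + u.length := by
  intro u
  induction u with
  | nil =>
    intro i q r hq hpr hdrop
    rw [List.nil_append] at hdrop
    have hq0 : q = 0 := by simpa [pvParRun] using hpr
    subst hq0
    have hlt : i < (l ++ ['#']).length := pv_drop_ne_nil_lt hdrop
    have hg := (pv_drop_head '#' hdrop).1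
    rw [show l.length + 2 - i = (l.length + 1 - i) + 1 from by
      simp [List.length_append] at hlt; omega]
    simp only [pvParenA, hg]
    simp only [if_true]
    rw [if_neg (show ¬ (')' = '(') by decide)]
    rw [if_pos (by omega : (0:Int) + 1 - 1 = 0)]
    simp
  | cons c u ih =>
    intro i q r hq hpr hdrop
    have hdrop1 : (l ++ ['#']).drop i = c :: (u ++ ')' :: r) := by simpa using hdrop
    have hlt : i < (l ++ ['#']).length := pv_drop_ne_nil_lt hdrop1
    have hg := (pv_drop_head '#' hdrop1).1
    have hdrop2 : (l ++ ['#']).drop (i + 1) = u ++ ')' :: r := (pv_drop_head '#' hdrop1).2.2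
    have hfe : l.length + 2 - i = (l.length + 2 - (i + 1)) + 1 := by
      simp [List.length_append] at hlt; omega
    by_cases h1 : c = '('
    · subst h1
      simp only [pvParRun, reduceIte] at hpr
      rw [hfe]
      simp only [pvParenA, hg]
      simp only [if_true]
      rw [if_neg (show ¬ ('(' = ')') by decide)]
      rw [if_neg (by omega : ¬ (q + 1 + 1 = 0))]
      rw [show q + 1 + 1 = (q + 1) + 1 from rfl]
      rw [ih (i + 1) (q + 1) r (by omega) hpr hdrop2]
      simp only [List.length_cons]; omega
    · by_cases h2 : c = ')'
      · subst h2
        simp only [pvParRun, reduceIte] at hpr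
        by_cases hqpos : 0 < q
        case neg => rw [if_neg hqpos] at hpr; cases hpr
        rw [if_pos hqpos] at hpr
        rw [hfe]
        simp only [pvParenA, hg]
        simp only [if_true]
        rw [if_neg (show ¬ (')' = '(') by decide)]
        rw [if_neg (by omega : ¬ (q + 1 - 1 = 0))]
        rw [show q + 1 - 1 = (q - 1) + 1 from by ring]
        rw [ih (i + 1) (q - 1) r (by omega) hpr hdrop2]
        simp only [List.length_cons]; omega
      · simp only [pvParRun, if_neg h1, if_neg h2] at hpr
        rw [hfe]
        simp only [pvParenA, hg]
        rw [if_neg h1, if_neg h2]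
        rw [if_neg (by omega : ¬ (q + 1 = 0))]
        rw [ih (i + 1) q r hq hpr hdrop2]
        simp only [List.length_cons]; omega

-- ---- decomposition of a derivation, as A's outer loop consumes it ----
theorem pv_valid_cases {t : List Char} (h : pvValid t) :
    t = [] ∨
    (∃ c t', c ∈ pvAlphabet ∧ pvValid t' ∧ t = c :: t') ∨
    (∃ ds c t', (∀ d ∈ ds, PySem.Chars.isdigit d = true) ∧ ds ≠ [] ∧ c ∈ pvAlphabet ∧
      pvValid t' ∧ t = ds ++ c :: t') ∨
    (∃ ds inner t', (∀ d ∈ ds, PySem.Chars.isdigit d = true) ∧ pvValid inner ∧ pvValid t' ∧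
      t = ds ++ '(' :: inner ++ ')' :: t') := by
  cases h with
  | nil => exact Or.inl rfl
  | letter ds c t hds hc hv =>
    by_cases hds0 : ds = []
    · subst hds0; exact Or.inr (Or.inl ⟨c, t, hc, hv, by simp⟩)
    · exact Or.inr (Or.inr (Or.inl ⟨ds, c, t, hds, hds0, hc, hv, rfl⟩))
  | group ds inner t hds hin ht =>
    exact Or.inr (Or.inr (Or.inr ⟨ds, inner, t, hds, hin, ht, rfl⟩))

-- ---- A-side outer loop ----
theorem pvOuterA_nil (rec : List Char → PySem.Dict String Int) (l : List Char) {i f : Nat}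
    (hi : l.length ≤ i) (hf : 0 < f) (g : Char → Int) :
    pvOuterA rec (l ++ ['#']) l.length f i (pvMkD g) = pvMkD (fun x => g x + pvCnt [] x) := by
  cases f with
  | zero => omega
  | succ f =>
    simp only [pvOuterA, if_neg (show ¬ i < l.length from by omega)]
    apply pv_mkD_congr
    intro x _
    rw [pvCnt_nil]
    ring

theorem pvOuterA_letter (rec : List Char → PySem.Dict String Int) (l : List Char)
    {i : Nat} {c : Char} {t' : List Char} (hdrop : l.drop i = c :: t') (hc : c ∈ pvAlphabet)
    (f : Nat) (d : PySem.Dict String Int) :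
    pvOuterA rec (l ++ ['#']) l.length (f + 1) i d
      = pvOuterA rec (l ++ ['#']) l.length (f + 1) (i + 1) (pvBumpA d c 1) := by
  have hlt := pv_drop_ne_nil_lt hdrop
  have hg := pv_s_getD hdrop
  have ha := pv_alpha_facts c hc
  have hstep : pvLettersA (l ++ ['#']) (l.length + 1 - i) i d
      = pvLettersA (l ++ ['#']) (l.length + 1 - (i + 1)) (i + 1) (pvBumpA d c 1) := by
    rw [show l.length + 1 - i = (l.length + 1 - (i + 1)) + 1 from by omega]
    simp only [pvLettersA, hg, if_neg ha.2.2.1,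
      if_pos (show c ≠ '(' ∧ PySem.Chars.isdigit c = false ∧ c ≠ ')' from
        ⟨ha.1, ha.2.2.2, ha.2.1⟩)]
  by_cases h2 : i + 1 < l.length
  · simp only [pvOuterA, if_pos hlt, if_pos h2, hstep]
  · have ht' : t' = [] := by
      have h1 := pv_drop_len hdrop (le_of_lt hlt)
      simp only [List.length_cons] at h1
      have : t'.length = 0 := by omega
      exact List.eq_nil_of_length_eq_zero this
    subst ht'
    have hie : i + 1 = l.length := by
      have h1 := pv_drop_len hdrop (le_of_lt hlt)
      simp at h1; omega
    simp only [pvOuterA, if_pos hlt, if_neg h2, hstep]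
    rw [show l.length + 1 - (i + 1) = 1 from by omega]
    have hgend : (l ++ ['#'])[i + 1]? = some '#' := by
      rw [hie]; exact pv_s_get?_end l
    simp [pvLettersA, hgend]

theorem pvOuterA_spec (l : List Char)
    (hok : ∀ c ∈ l, c ∈ pvAlphabet ∨ PySem.Chars.isdigit c = true ∨ c = '(' ∨ c = ')')
    (rec : List Char → PySem.Dict String Int)
    (hrec : ∀ u, (∀ c ∈ u, c ∈ pvAlphabet ∨ PySem.Chars.isdigit c = true ∨ c = '(' ∨ c = ')') →
      pvValid u → u.length < l.length → rec u = pvMkD (pvCnt u)) :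
    ∀ (N : Nat) (t : List Char), t.length ≤ N → pvValid t → ∀ (i : Nat), i ≤ l.length →
    l.drop i = t → ∀ (f : Nat), l.length - i < f → ∀ (g : Char → Int),
    pvOuterA rec (l ++ ['#']) l.length f i (pvMkD g) = pvMkD (fun x => g x + pvCnt t x) := by
  intro N
  induction N with
  | zero =>
    intro t ht hv i hi hdrop f hf g
    have ht0 : t = [] := List.eq_nil_of_length_eq_zero (Nat.le_zero.mp ht)
    subst ht0
    exact pvOuterA_nil rec l (List.drop_eq_nil_iff.mp hdrop) (by omega) g
  | succ N ihN =>
    intro t ht hv i hi hdrop f hf g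
    rcases pv_valid_cases hv with rfl | ⟨c, t', hc, hv', rfl⟩ |
      ⟨ds, c, t', hds, hds0, hc, hv', rfl⟩ | ⟨ds, inner, t', hds, hin, hv', rfl⟩
    · exact pvOuterA_nil rec l (List.drop_eq_nil_iff.mp hdrop) (by omega) g
    · -- one leading letter: unroll the inner letters loop one step
      have hlt := pv_drop_ne_nil_lt hdrop
      cases f with
      | zero => omega
      | succ f =>
        rw [pvOuterA_letter rec l hdrop hc f (pvMkD g)]
        rw [pv_bump_mkD g c hc 1]
        rw [ihN t' (by simpa using ht) hv' (i + 1) (by omega)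
          (pv_drop_head ' ' hdrop).2.2 (f + 1) (by omega) _]
        apply pv_mkD_congr
        intro x _
        have hcl := pvCnt_letter (ds := []) (by simp) hc hv'
        rw [List.nil_append] at hcl
        rw [hcl]
        simp only [if_true]
        by_cases hxc : x = c
        · subst hxc; simp; ring
        · simp [hxc]
    · -- digits then a letter
      obtain ⟨d0, ds0, rfl⟩ := List.exists_cons_of_ne_nil hds0
      have hdrop1 : l.drop i = d0 :: (ds0 ++ c :: t') := by simpa using hdrop
      have hi_lt : i < l.length := pv_drop_ne_nil_lt hdrop1
      cases f with
      | zero => omega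
      | succ f =>
        have hLen := pv_drop_len hdrop hi
        simp only [List.length_append, List.length_cons] at hLen
        simp only [pvOuterA, if_pos hi_lt]
        rw [pvLettersA_run l [] (by simp) ((d0 :: ds0) ++ c :: t')
          (Or.inr ⟨d0, ds0 ++ c :: t', by simp, Or.inl (hds d0 (by simp))⟩) i hi
          (by simpa using hdrop) (pvMkD g)]
        rw [if_neg (by simp)]
        simp only [List.length_nil, Nat.add_zero, List.foldl_nil]
        rw [pvNumA_run l (d0 :: ds0) hds (c :: t')
          (Or.inr ⟨c, t', rfl, (pv_alpha_facts c hc).2.2.2⟩) i hi hdrop1 []]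
        have hdropc : l.drop (i + (d0 :: ds0).length) = c :: t' := by
          have := pv_drop_shift (l := l) (a := d0 :: ds0) (b := c :: t') (i := i) hdrop1
          simpa using this
        have hgc : (l ++ ['#']).getD (i + (d0 :: ds0).length) '#' = c := pv_s_getD hdropc
        have hslice : PySem.List.slice (l ++ ['#']) (some (i : Int))
            (some ((i + (d0 :: ds0).length : Nat) : Int)) = d0 :: ds0 := by
          rw [PySem.List.slice_natCast]
          rw [show i + (d0 :: ds0).length - i = (d0 :: ds0).length from by omega]
          rw [pv_s_drop (le_of_lt hi_lt), hdrop1]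
          rw [show (d0 :: (ds0 ++ c :: t')) ++ ['#']
              = (d0 :: ds0) ++ (c :: t' ++ ['#']) from by simp]
          rw [List.take_left]
        simp only [List.nil_append]
        rw [if_pos (by simp : (d0 :: ds0) ≠ [])]
        rw [hslice, hgc]
        rw [if_pos (pv_alpha_facts c hc).1]
        rw [pv_bump_mkD g c hc _]
        rw [ihN t' (by simp only [List.length_append, List.length_cons] at ht; omega) hv'
          (i + (d0 :: ds0).length + 1) (by simp only [List.length_cons]; omega)
          (pv_drop_head ' ' hdropc).2.2 f (by simp only [List.length_cons]; omega) _]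
        apply pv_mkD_congr
        intro x _
        rw [pvCnt_letter hds hc hv']
        rw [if_neg (by simp : ¬ ((d0 :: ds0) = []))]
        by_cases hxc : x = c
        · subst hxc; simp; ring
        · simp [hxc]
    · -- a (possibly multiplied) group
      have hdrop1 : l.drop i = ds ++ ('(' :: (inner ++ ')' :: t')) := by simpa using hdrop
      have hi_lt : i < l.length := by
        cases ds with
        | nil =>
          exact pv_drop_ne_nil_lt
            (show l.drop i = '(' :: (inner ++ ')' :: t') from by simpa using hdrop1)
        | cons d0 ds0 =>
          exact pv_drop_ne_nil_lt
            (show l.drop i = d0 :: (ds0 ++ '(' :: (inner ++ ')' :: t')) from by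
              simpa using hdrop1)
      cases f with
      | zero => omega
      | succ f =>
        have hLen := pv_drop_len hdrop hi
        simp only [List.length_append, List.length_cons] at hLen
        have hu0 : ∃ c0 u0, ds ++ ('(' :: (inner ++ ')' :: t')) = c0 :: u0 ∧
            (PySem.Chars.isdigit c0 = true ∨ c0 = '(' ∨ c0 = ')') := by
          cases ds with
          | nil => exact ⟨'(', inner ++ ')' :: t', by simp, Or.inr (Or.inl rfl)⟩
          | cons d0 ds0 =>
            exact ⟨d0, ds0 ++ ('(' :: (inner ++ ')' :: t')), by simp,
              Or.inl (hds d0 (by simp))⟩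
        obtain ⟨c0, u0, he0, hc0⟩ := hu0
        simp only [pvOuterA, if_pos hi_lt]
        rw [pvLettersA_run l [] (by simp) (ds ++ ('(' :: (inner ++ ')' :: t')))
          (Or.inr ⟨c0, u0, he0, hc0⟩) i hi (by simpa using hdrop1) (pvMkD g)]
        rw [if_neg (by rw [he0]; simp)]
        simp only [List.length_nil, Nat.add_zero, List.foldl_nil]
        rw [pvNumA_run l ds hds ('(' :: (inner ++ ')' :: t'))
          (Or.inr ⟨'(', inner ++ ')' :: t', rfl, by decide⟩) i hi hdrop1 []]
        have hdropc : l.drop (i + ds.length) = '(' :: (inner ++ ')' :: t') :=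
          pv_drop_shift hdrop1
        have hgc : (l ++ ['#']).getD (i + ds.length) '#' = '(' := pv_s_getD hdropc
        have hdropin : l.drop (i + ds.length + 1) = inner ++ ')' :: t' :=
          (pv_drop_head ' ' hdropc).2.2
        have hm : (if ([] ++ ds) ≠ [] then
            (PySem.Int.ofChars? (PySem.List.slice (l ++ ['#']) (some (i : Int))
              (some ((i + ds.length : Nat) : Int)))).getD 0
          else 1) = (if ds = [] then 1 else (PySem.Int.ofChars? ds).getD 0) := by
          by_cases hds0 : ds = []
          · simp [hds0]
          · rw [if_pos (by simpa using hds0), if_neg hds0]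
            rw [PySem.List.slice_natCast]
            rw [show i + ds.length - i = ds.length from by omega]
            rw [pv_s_drop (le_of_lt hi_lt), hdrop1]
            rw [show (ds ++ ('(' :: (inner ++ ')' :: t'))) ++ ['#']
                = ds ++ ('(' :: (inner ++ ')' :: t') ++ ['#']) from by simp]
            rw [List.take_left]
        rw [hm, hgc]
        rw [if_neg (by simp)]
        -- the matching-parenthesis scan
        have hilen : i + ds.length ≤ l.length := by omega
        have hdropS : (l ++ ['#']).drop (i + ds.length + 1)
            = inner ++ ')' :: (t' ++ ['#']) := by
          rw [pv_s_drop (by omega), hdropin]; simp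
        have hscan1 : pvParenA (l ++ ['#']) (l.length + 2 - (i + ds.length)) (i + ds.length) 0
            = i + ds.length + 1 + inner.length := by
          rw [show l.length + 2 - (i + ds.length) = (l.length + 2 - (i + ds.length + 1)) + 1
            from by omega]
          simp only [pvParenA, hgc]
          simp only [if_true]
          rw [if_neg (show ¬ ('(' = ')') by decide)]
          rw [if_neg (by omega : ¬ ((0:Int) + 1 = 0))]
          have := pvParenA_run l inner (i + ds.length + 1) 0 (t' ++ ['#']) le_rfl
            (pv_valid_parRun hin) hdropS
          rw [this]
        rw [hscan1]
        have hslice2 : PySem.List.slice (l ++ ['#'])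
            (some ((i + ds.length + 1 : Nat) : Int))
            (some ((i + ds.length + 1 + inner.length : Nat) : Int)) = inner := by
          rw [PySem.List.slice_natCast]
          rw [show i + ds.length + 1 + inner.length - (i + ds.length + 1) = inner.length
            from by omega]
          rw [hdropS]
          rw [show inner ++ ')' :: (t' ++ ['#']) = inner ++ (')' :: (t' ++ ['#'])) from rfl]
          rw [List.take_left]
        rw [hslice2]
        rw [hrec inner (fun c hc => hok c (List.mem_of_mem_drop (by
          rw [hdropin]; exact List.mem_append_left _ hc))) hin (by omega)]
        rw [pv_foldAdd_mkD (fun k => (pvMkD (pvCnt inner)).getD (pvKey k) 0)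
          (if ds = [] then 1 else (PySem.Int.ofChars? ds).getD 0) pvAlphabet
          pv_alphabet_nodup (fun c hc => hc) g]
        have hdropr : l.drop (i + ds.length + 1 + inner.length) = ')' :: t' :=
          pv_drop_shift hdropin
        have hdropt : l.drop (i + ds.length + 1 + inner.length + 1) = t' :=
          (pv_drop_head ' ' hdropr).2.2
        rw [ihN t' (by simp only [List.length_append, List.length_cons] at ht; omega) hv'
          (i + ds.length + 1 + inner.length + 1) (by omega) hdropt f (by omega) _]
        apply pv_mkD_congr
        intro x hx
        rw [pvCnt_group hds hin hv']
        rw [if_pos hx, pv_getD_mkD _ x hx]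
        ring

theorem pvSearchA_spec : ∀ (df : Nat) (l : List Char), l.length < df →
    (∀ c ∈ l, c ∈ pvAlphabet ∨ PySem.Chars.isdigit c = true ∨ c = '(' ∨ c = ')') →
    pvValid l → pvSearchA df l = pvMkD (pvCnt l) := by
  intro df
  induction df with
  | zero => intro l h; omega
  | succ df ih =>
    intro l hlen hok hv
    show pvOuterA (pvSearchA df) (l ++ ['#']) l.length (l.length + 1) 0 pvInitDict = _
    rw [pv_init_eq]
    have hrec : ∀ u,
        (∀ c ∈ u, c ∈ pvAlphabet ∨ PySem.Chars.isdigit c = true ∨ c = '(' ∨ c = ')') →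
        pvValid u → u.length < l.length → pvSearchA df u = pvMkD (pvCnt u) := by
      intro u hoku hu hlt
      exact ih u (by omega) hoku hu
    rw [pvOuterA_spec l hok (pvSearchA df) hrec l.length l le_rfl hv 0 (by omega)
      (by simp) (l.length + 1) (by omega) (fun _ => 0)]
    apply pv_mkD_congr
    intro x _
    ring

-- ===== VERDICT (by name: the statement is the Claim_ definition above) =====
theorem search_spec : Claim_equal_search := by
  intro strings _ hpre
  unfold Spec_search
  obtain ⟨hall, hdg, hpar⟩ := hpre
  have hok : ∀ c ∈ strings.toList,
      c ∈ pvAlphabet ∨ PySem.Chars.isdigit c = true ∨ c = '(' ∨ c = ')' := by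
    intro c hc
    have h := List.all_eq_true.mp hall c hc
    simp only [Bool.or_eq_true, beq_iff_eq] at h
    rcases h with ((h | h) | h) | h
    · exact Or.inl (List.contains_iff_mem.mp h)
    · exact Or.inr (Or.inl h)
    · exact Or.inr (Or.inr (Or.inl h))
    · exact Or.inr (Or.inr (Or.inr h))
  have hv := pv_valid_of_pre strings.toList hok hdg hpar
  show (pvSearchA (strings.toList.length + 1) strings.toList).items
      = (pvParseB strings.toList strings.toList.length
          (2 * strings.toList.length + 2) 0 pvInitDict).1.items
  rw [pvSearchA_spec (strings.toList.length + 1) strings.toList (by omega) hok hv]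
  rw [pv_init_eq]
  rw [pvParseB_spec strings.toList hv [] (Or.inl rfl) 0 (by omega) (by simp)
    (2 * strings.toList.length + 2) (by omega) (fun _ => 0)]
  have he : pvMkD (pvCnt strings.toList)
      = pvMkD (fun x => (fun _ => (0:Int)) x + pvCnt strings.toList x) :=
    pv_mkD_congr (fun x _ => by simp)
  rw [he]
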